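-- pv_equiv track=rewrite | github.com/zcsee/pythonPra | top100/demo34.py | leftMargin
-- ===== SOURCE A (Python) =====
-- from typing import List
--
-- def leftMargin(nums: List[int], target: int):
--
--     low, high = 0, len(nums) - 1
--
--     while low <= high:
--         mid = low + (high - low) // 2
--
--         # 如果 nums[mid] = target，继续向左寻找左边界
--         if nums[mid] >= target:
--             high = mid - 1
--         # elif nums[mid] > target:
--         #     high = mid - 1
--         else:
--             low = mid + 1
--     if nums[low] == target:
--         return low
--     # 如果左边界的值不等于 target
--     else:
--         return -1
-- ===== SOURCE B (Python) =====
-- def leftMargin(nums, target):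
--     # recursive decomposition over (segment start, segment size); probes the
--     # same midpoints as the iterative two-pointer version
--     def find(lo, k):
--         if k == 0:
--             return lo
--         half = (k - 1) // 2
--         mid = lo + half
--         if nums[mid] >= target:
--             return find(lo, half)
--         return find(mid + 1, k - 1 - half)
--     i = find(0, len(nums))
--     if nums[i] == target:
--         return i
--     return -1
-- ===== Notes on version B (the rewrite author's own statement) =====
-- stated objective: alternative
-- what changed: Replaces the iterative low/high two-pointer while-loop by a recursive helper over (segment start, segment size) that probes the same midpoints; the final unguarded nums[i] check is kept.
import Mathlib
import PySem

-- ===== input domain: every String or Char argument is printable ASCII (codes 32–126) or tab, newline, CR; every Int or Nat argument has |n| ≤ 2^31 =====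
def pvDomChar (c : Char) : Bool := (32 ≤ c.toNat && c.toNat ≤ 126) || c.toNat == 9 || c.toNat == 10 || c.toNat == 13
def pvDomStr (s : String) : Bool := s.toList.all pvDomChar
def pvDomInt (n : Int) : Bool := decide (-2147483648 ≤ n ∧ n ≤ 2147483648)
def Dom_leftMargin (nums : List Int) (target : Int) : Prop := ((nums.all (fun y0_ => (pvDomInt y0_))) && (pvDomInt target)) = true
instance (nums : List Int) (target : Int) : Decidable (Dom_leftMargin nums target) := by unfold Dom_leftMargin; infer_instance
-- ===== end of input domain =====

-- B replaces A's iterative low/high while-loop by a recursive helper on (segment start, segment size)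
-- probing the same midpoints (objective: alternative decomposition, same cost).

-- ===== PORT A =====
-- while low <= high: mid = low + (high-low)//2; if nums[mid] >= target: high = mid-1 else low = mid+1
-- The gas argument only makes the loop total: each iteration shrinks the interval, so gas = len nums
-- (≥ the interval length) is never exhausted and the gas-0 branch coincides with the loop exit.
-- nums[mid] is always in range while 0 ≤ low ≤ high < len nums (invariant of the run), so pyGetD is exact there.
def leftMarginLoop (nums : List Int) (target : Int) : Int → Int → Nat → Int
  | low, _, 0 => low
  | low, high, g + 1 =>
    if low ≤ high then
      let mid := low + PySem.Int.floordiv (high - low) 2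
      if target ≤ PySem.List.pyGetD nums mid 0 then
        leftMarginLoop nums target low (mid - 1) g
      else
        leftMarginLoop nums target (mid + 1) high g
    else low

def leftMargin (nums : List Int) (target : Int) : Int :=
  let low := leftMarginLoop nums target 0 ((nums.length : Int) - 1) nums.length
  -- Python's final unguarded nums[low]: raises IndexError iff low = len nums; Pre_ excludes exactly that.
  if PySem.List.pyGetD nums low 0 = target then low else -1

-- ===== PORT B =====
-- find(lo, k): k = 0 → lo; else half = (k-1)//2, mid = lo+half; nums[mid] >= target → find(lo, half) else find(mid+1, k-1-half)
-- The gas argument only makes the recursion total: both recursive calls are on a strictly smaller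
-- segment size, so gas = len nums (≥ the initial size) is never exhausted.
def leftMarginFind (nums : List Int) (target : Int) : Int → Nat → Nat → Int
  | lo, _, 0 => lo
  | lo, 0, _ + 1 => lo
  | lo, k + 1, g + 1 =>
    let half := k / 2
    let mid := lo + (half : Int)
    if target ≤ PySem.List.pyGetD nums mid 0 then
      leftMarginFind nums target lo half g
    else
      leftMarginFind nums target (mid + 1) (k - half) g

def leftMargin_alt (nums : List Int) (target : Int) : Int :=
  let i := leftMarginFind nums target 0 nums.length nums.length
  if PySem.List.pyGetD nums i 0 = target then i else -1

-- ===== PRECONDITION & SPEC =====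
-- A's final nums[low] raises IndexError exactly when every element the all-right search path probes
-- is < target; those probe positions are, in closed form, the indices n-1-(n >>> (j+1)) (n = len nums).
-- Pre_ excludes exactly the raising inputs (in particular the empty list) and admits every input on
-- which the Python A returns.
def Pre_leftMargin (nums : List Int) (target : Int) : Prop :=
  ∃ j < nums.length, target ≤ nums.getD (nums.length - 1 - (nums.length >>> (j + 1))) 0
instance (nums : List Int) (target : Int) : Decidable (Pre_leftMargin nums target) := by
  unfold Pre_leftMargin; infer_instance

def pvWitness_leftMargin : List Int × Int := ([3, 5], 5)

def Spec_leftMargin (nums : List Int) (target : Int) (out : Int) : Prop := out = leftMargin_alt nums target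
instance (nums : List Int) (target : Int) (out : Int) : Decidable (Spec_leftMargin nums target out) := by unfold Spec_leftMargin; infer_instance

-- ===== CLAIM (what is proved, stated in full; the proofs are below) =====
def Claim_equal_leftMargin : Prop := ∀ (nums : List Int) (target : Int), Dom_leftMargin nums target → Pre_leftMargin nums target → Spec_leftMargin nums target (leftMargin nums target)

-- ===== LEMMAS AND PROOFS =====

-- with enough gas, the iterative loop on [lo, lo+k-1] computes what the size recursion computes
theorem loop_eq_find (nums : List Int) (target : Int) :
    ∀ (g k : Nat) (lo : Int), k ≤ g →
      leftMarginLoop nums target lo (lo + (k : Int) - 1) g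
        = leftMarginFind nums target lo k g := by
  intro g
  induction g with
  | zero =>
    intro k lo hk
    interval_cases k
    rfl
  | succ g ih =>
    intro k lo hk
    match k with
    | 0 =>
      show (if lo ≤ lo + ((0 : Nat) : Int) - 1 then _ else lo) = lo
      rw [if_neg (by push_cast; omega)]
    | (k' + 1) =>
      show (if lo ≤ lo + ((k' + 1 : Nat) : Int) - 1 then _ else lo) = _
      rw [if_pos (by push_cast; omega)]
      have harg : lo + ((k' + 1 : Nat) : Int) - 1 - lo = ((k' : Nat) : Int) := by push_cast; omega
      have h2 : PySem.Int.floordiv ((k' : Nat) : Int) 2 = ((k' / 2 : Nat) : Int) := by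
        exact_mod_cast PySem.Int.floordiv_natCast k' 2
      show (if target ≤ PySem.List.pyGetD nums
              (lo + PySem.Int.floordiv (lo + ((k' + 1 : Nat) : Int) - 1 - lo) 2) 0 then _ else _)
          = leftMarginFind nums target lo (k' + 1) (g + 1)
      rw [harg, h2]
      show _ = (if target ≤ PySem.List.pyGetD nums (lo + ((k' / 2 : Nat) : Int)) 0 then
          leftMarginFind nums target lo (k' / 2) g
        else leftMarginFind nums target (lo + ((k' / 2 : Nat) : Int) + 1) (k' - k' / 2) g)
      by_cases hc : target ≤ PySem.List.pyGetD nums (lo + ((k' / 2 : Nat) : Int)) 0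
      · rw [if_pos hc, if_pos hc, ← ih (k' / 2) lo (by omega)]
      · rw [if_neg hc, if_neg hc,
            ← ih (k' - k' / 2) (lo + ((k' / 2 : Nat) : Int) + 1) (by omega)]
        congr 1
        have hcast : ((k' - k' / 2 : Nat) : Int) = (k' : Int) - ((k' / 2 : Nat) : Int) := by
          push_cast [Nat.cast_sub (Nat.div_le_self k' 2)]; ring
        rw [hcast]
        push_cast; ring

theorem leftMargin_eq_alt (nums : List Int) (target : Int) :
    leftMargin nums target = leftMargin_alt nums target := by
  unfold leftMargin leftMargin_alt
  have h : leftMarginLoop nums target 0 ((nums.length : Int) - 1) nums.length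
      = leftMarginFind nums target 0 nums.length nums.length := by
    have := loop_eq_find nums target nums.length nums.length 0 le_rfl
    simpa using this
  rw [h]

-- ===== VERDICT (by name: the statement is the Claim_ definition above) =====
theorem leftMargin_spec : Claim_equal_leftMargin := by
  intro nums target _ _
  unfold Spec_leftMargin
  exact leftMargin_eq_alt nums target
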